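-- pv_equiv track=rewrite | github.com/mydav/no_war_project | modules_23/my_check_sites.py | remove_sessions_from_page
-- ===== SOURCE A (Python) =====
-- def remove_sessions_from_page(page, parts="PHPSESSID phpsessid sid"):
--     if isinstance(parts, str):
--         bads = parts.split(" ")
--     else:
--         bads = parts
--     zamena = "PHPSESSID"
--     for b in bads:
--         page = page.replace(b, zamena)
--     # 	return page
--     removing = ["&%s=" % zamena, "?%s=" % zamena]
--     for r in removing:
--         items = page.split(r)
--         parts = [items[0]]
--         for item in items[1:]:
--             more = item[32:]
--             parts.append(more)
--         page = "".join(parts)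
--     return page
-- ===== SOURCE B (Python) =====
-- def remove_sessions_from_page(page, parts="PHPSESSID phpsessid sid"):
--     bads = parts.split(" ") if isinstance(parts, str) else parts
--     for b in bads:
--         page = page.replace(b, "PHPSESSID")
--     # single left-to-right scan per separator: skip the separator and up to 32
--     # following chars (stopping early at the next separator occurrence)
--     for sep in ("&PHPSESSID=", "?PHPSESSID="):
--         out = []
--         i = 0
--         n = len(page)
--         while i < n:
--             if page.startswith(sep, i):
--                 i += len(sep)
--                 budget = 32
--                 while budget and i < n and not page.startswith(sep, i):
--                     i += 1
--                     budget -= 1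
--             else:
--                 out.append(page[i])
--                 i += 1
--         page = "".join(out)
--     return page
-- ===== Notes on version B (the rewrite author's own statement) =====
-- stated objective: alternative
-- what changed: The second phase (split on each separator, slice 32 chars off every later piece, re-join) is replaced by a single left-to-right index scan per separator that copies characters and, on meeting the separator, skips it plus up to 32 following characters, stopping early at the next separator occurrence; no intermediate list of pieces is built.
import Mathlib
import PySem

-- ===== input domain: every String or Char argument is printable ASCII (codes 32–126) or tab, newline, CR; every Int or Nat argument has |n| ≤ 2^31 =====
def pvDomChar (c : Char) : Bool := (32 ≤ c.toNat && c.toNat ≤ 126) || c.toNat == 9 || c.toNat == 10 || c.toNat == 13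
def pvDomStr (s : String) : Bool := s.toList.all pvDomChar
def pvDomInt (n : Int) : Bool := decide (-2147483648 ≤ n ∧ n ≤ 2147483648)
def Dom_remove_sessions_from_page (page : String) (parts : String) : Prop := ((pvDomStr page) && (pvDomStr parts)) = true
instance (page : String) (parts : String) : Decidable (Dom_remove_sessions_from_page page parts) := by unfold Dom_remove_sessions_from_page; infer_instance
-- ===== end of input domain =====

-- B replaces A's split/slice/join second phase by a single left-to-right scan per
-- separator (same return value; objective: alternative — no speed claim).

-- ===== PORT A =====
-- literal port of A: replace each bad token, then for each separator split the page,
-- drop the first 32 chars of every piece after the first, and re-join.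
def remove_sessions_from_page (page : String) (parts : String) : String :=
  -- parts : String, so Python's isinstance(parts, str) branch is always taken
  let bads := PySem.Chars.splitOn parts.toList [' ']
  let zamena := "PHPSESSID".toList
  let page1 := bads.foldl (fun p b => PySem.Chars.replace p b zamena) page.toList
  let removing := ['&' :: zamena ++ ['='], '?' :: zamena ++ ['=']]
  let page2 := removing.foldl (fun p r =>
    -- items = page.split(r): r is never empty here, so split cannot raise
    let items := PySem.Chars.splitOn p r
    -- parts = [items[0]]; items is non-empty (split always returns ≥ 1 piece)
    -- then 'for item in items[1:]: parts.append(item[32:])'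
    let ps := (PySem.List.slice items (some 1) none).foldl
      (fun acc item => acc ++ [PySem.List.slice item (some 32) none]) [items.headI]
    PySem.Chars.join [] ps) page1
  String.ofList page2

-- ===== PORT B =====
-- B-side helpers: skipChars skips up to n chars, stopping early at an occurrence of sep
def skipChars (sep : List Char) : Nat → List Char → List Char
  | 0, s => s
  | _ + 1, [] => []
  | n + 1, c :: rest => if sep.isPrefixOf (c :: rest) then c :: rest else skipChars sep n rest

theorem skipChars_length_le (sep : List Char) (n : Nat) (s : List Char) :
    (skipChars sep n s).length ≤ s.length := by
  induction n generalizing s with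
  | zero => simp [skipChars]
  | succ n ih =>
    cases s with
    | nil => simp [skipChars]
    | cons c rest =>
      simp only [skipChars]
      split
      · simp
      · exact le_trans (ih rest) (by simp)

-- scrubChars: copy chars; on meeting the separator, drop it and up to 32 chars after it
def scrubChars (sc : Char) (srest : List Char) : List Char → List Char
  | [] => []
  | c :: rest =>
    if (sc :: srest).isPrefixOf (c :: rest) then
      scrubChars sc srest (skipChars (sc :: srest) 32 ((c :: rest).drop (sc :: srest).length))
    else
      c :: scrubChars sc srest rest
termination_by s => s.length
decreasing_by
  · exact Nat.lt_succ_of_le (le_trans (skipChars_length_le _ _ _) (by simp))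
  · simp

def remove_sessions_from_page_alt (page : String) (parts : String) : String :=
  let bads := PySem.Chars.splitOn parts.toList [' ']
  let page1 := bads.foldl (fun p b => PySem.Chars.replace p b "PHPSESSID".toList) page.toList
  let page2 := scrubChars '&' "PHPSESSID=".toList page1
  let page3 := scrubChars '?' "PHPSESSID=".toList page2
  String.ofList page3

-- ===== PRECONDITION & SPEC =====
def Spec_remove_sessions_from_page (page : String) (parts : String) (out : String) : Prop := out = remove_sessions_from_page_alt page parts
instance (page : String) (parts : String) (out : String) : Decidable (Spec_remove_sessions_from_page page parts out) := by unfold Spec_remove_sessions_from_page; infer_instance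

-- ===== CLAIM (what is proved, stated in full; the proofs are below) =====
def Claim_equal_remove_sessions_from_page : Prop := ∀ (page : String) (parts : String), Dom_remove_sessions_from_page page parts → Spec_remove_sessions_from_page page parts (remove_sessions_from_page page parts)

-- ===== LEMMAS AND PROOFS =====

theorem flatten_intersperse_nil {α : Type} (l : List (List α)) :
    (List.intersperse ([] : List α) l).flatten = l.flatten := by
  induction l with
  | nil => rfl
  | cons a t ih =>
    cases t with
    | nil => rfl
    | cons b t' => simp_all [List.intersperse]

-- fuel-free characterisation of PySem.Chars.splitOn for a non-empty separator
def splitCore (sc : Char) (srest : List Char) : List Char → List (List Char)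
  | [] => [[]]
  | c :: rest =>
    if (sc :: srest).isPrefixOf (c :: rest) then
      [] :: splitCore sc srest ((c :: rest).drop (sc :: srest).length)
    else
      (c :: (splitCore sc srest rest).headI) :: (splitCore sc srest rest).tail
termination_by s => s.length
decreasing_by
  · simp
  · simp

theorem splitCore_ne_nil (sc : Char) (srest : List Char) (s : List Char) :
    splitCore sc srest s ≠ [] := by
  cases s with
  | nil => simp [splitCore]
  | cons c rest =>
    rw [splitCore]
    split <;> simp

theorem splitOn_go_eq (sc : Char) (srest : List Char) :
    ∀ (fuel : Nat) (l cur : List Char) (accs : List (List Char)), l.length < fuel →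
      PySem.Chars.splitOn.go (sc :: srest) fuel l cur accs =
        accs.reverse ++ (cur.reverse ++ (splitCore sc srest l).headI) :: (splitCore sc srest l).tail := by
  intro fuel
  induction fuel with
  | zero => intro l cur accs h; omega
  | succ f ih =>
    intro l cur accs h
    cases l with
    | nil => simp [PySem.Chars.splitOn.go, splitCore]
    | cons c rest =>
      rw [PySem.Chars.splitOn.go]
      by_cases hp : (sc :: srest).isPrefixOf (c :: rest)
      · rw [if_pos hp, ih _ _ _ (by simp at h ⊢; omega)]
        rw [splitCore, if_pos hp]
        obtain ⟨h₂, t₂, he⟩ := List.exists_cons_of_ne_nil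
          (splitCore_ne_nil sc srest ((c :: rest).drop (sc :: srest).length))
        simp at he
        simp [he]
      · rw [if_neg hp, ih _ _ _ (by simp at h ⊢; omega)]
        rw [splitCore, if_neg hp]
        obtain ⟨h₂, t₂, he⟩ := List.exists_cons_of_ne_nil (splitCore_ne_nil sc srest rest)
        simp [he]

theorem splitOn_eq_splitCore (sc : Char) (srest : List Char) (s : List Char) :
    PySem.Chars.splitOn s (sc :: srest) = splitCore sc srest s := by
  rw [PySem.Chars.splitOn, splitOn_go_eq sc srest _ _ _ _ (by omega)]
  obtain ⟨h₂, t₂, he⟩ := List.exists_cons_of_ne_nil (splitCore_ne_nil sc srest s)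
  simp [he]

theorem scrub_both (sc : Char) (srest : List Char) :
    ∀ (N : Nat) (s : List Char), s.length < N →
      (scrubChars sc srest s =
        (splitCore sc srest s).headI ++ ((splitCore sc srest s).tail.map (List.drop 32)).flatten) ∧
      (∀ n : Nat, scrubChars sc srest (skipChars (sc :: srest) n s) =
        ((splitCore sc srest s).headI.drop n) ++ ((splitCore sc srest s).tail.map (List.drop 32)).flatten) := by
  intro N
  induction N with
  | zero => intro s h; omega
  | succ N ih =>
    intro s hs
    have hmain : scrubChars sc srest s =
        (splitCore sc srest s).headI ++ ((splitCore sc srest s).tail.map (List.drop 32)).flatten := by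
      cases s with
      | nil => simp [scrubChars, splitCore]
      | cons c rest =>
        rw [scrubChars]
        by_cases hp : (sc :: srest).isPrefixOf (c :: rest)
        · rw [if_pos hp]
          rw [(ih ((c :: rest).drop (sc :: srest).length) (by simp at hs ⊢; omega)).2 32]
          rw [splitCore, if_pos hp]
          obtain ⟨h₂, t₂, he⟩ := List.exists_cons_of_ne_nil
            (splitCore_ne_nil sc srest ((c :: rest).drop (sc :: srest).length))
          simp at he
          simp [he]
        · rw [if_neg hp]
          rw [(ih rest (by simp at hs ⊢; omega)).1]
          rw [splitCore, if_neg hp]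
          obtain ⟨h₂, t₂, he⟩ := List.exists_cons_of_ne_nil (splitCore_ne_nil sc srest rest)
          simp [he]
    refine ⟨hmain, ?_⟩
    intro n
    cases n with
    | zero => rw [skipChars, hmain]; simp
    | succ n =>
      cases s with
      | nil => simp [skipChars, scrubChars, splitCore]
      | cons c rest =>
        rw [skipChars]
        by_cases hp : (sc :: srest).isPrefixOf (c :: rest)
        · rw [if_pos hp, hmain, splitCore, if_pos hp]
          simp
        · rw [if_neg hp]
          rw [(ih rest (by simp at hs ⊢; omega)).2 n]
          rw [splitCore, if_neg hp]
          obtain ⟨h₂, t₂, he⟩ := List.exists_cons_of_ne_nil (splitCore_ne_nil sc srest rest)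
          simp [he]

-- the scan equals "head piece ++ flatten of (drop 32) of the later pieces"
theorem scrub_eq (sc : Char) (srest : List Char) (s : List Char) :
    scrubChars sc srest s =
      (splitCore sc srest s).headI ++ ((splitCore sc srest s).tail.map (List.drop 32)).flatten := by
  exact (scrub_both sc srest (s.length + 1) s (Nat.lt_succ_self _)).1

theorem phase_eq (sc : Char) (srest : List Char) (p : List Char) :
    PySem.Chars.join []
      ((PySem.List.slice (PySem.Chars.splitOn p (sc :: srest)) (some 1) none).foldl
        (fun acc item => acc ++ [PySem.List.slice item (some 32) none])
        [(PySem.Chars.splitOn p (sc :: srest)).headI]) =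
      scrubChars sc srest p := by
  rw [PySem.List.slice_from _ (a := 1) (by norm_num),
      PySem.List.foldl_append_singleton_eq_map, splitOn_eq_splitCore]
  have hd : ∀ item : List Char, PySem.List.slice item (some 32) = item.drop 32 := by
    intro item
    rw [PySem.List.slice_from item (a := 32) (by norm_num)]
    rfl
  rw [scrub_eq]
  simp only [PySem.Chars.join, List.intercalate, hd]
  rw [flatten_intersperse_nil]
  obtain ⟨h₂, t₂, he⟩ := List.exists_cons_of_ne_nil (splitCore_ne_nil sc srest p)
  simp [he]

-- ===== VERDICT (by name: the statement is the Claim_ definition above) =====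
theorem remove_sessions_from_page_spec : Claim_equal_remove_sessions_from_page := by
  intro page parts _
  unfold Spec_remove_sessions_from_page remove_sessions_from_page remove_sessions_from_page_alt
  simp only [List.foldl]
  have h1 : ('&' :: "PHPSESSID".toList) ++ ['='] = '&' :: "PHPSESSID=".toList := by decide
  have h2 : ('?' :: "PHPSESSID".toList) ++ ['='] = '?' :: "PHPSESSID=".toList := by decide
  rw [h1, h2, phase_eq '&' "PHPSESSID=".toList, phase_eq '?' "PHPSESSID=".toList]
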